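-- pv_equiv track=rewrite | github.com/the-young-tech/Flask-Firewall-With-404 | main.py | does_path_contain_forbidden_characters
-- ===== SOURCE A (Python) =====
-- forbidden_characters = ['//', '..', '~', '\\', '$', '$$' '%', '&', '%%', '&&', '!', '!!']
--
-- forbidden_extensions = ['.php', '.py']
--
-- def does_path_contain_forbidden_characters(path):
--     for char in forbidden_characters:
--         if char in path:
--             return True
--     for ext in forbidden_extensions:
--         if path.endswith(ext):
--             return True
--     return False
-- ===== SOURCE B (Python) =====
-- def does_path_contain_forbidden_characters(path):
--     # Single left-to-right scan: any forbidden single char, or a doubled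
--     # '/', '.' or '%' (covers '//', '..', '%%'; '$$%', '&&', '!!' are
--     # already implied by '$', '&', '!'), then the extension check.
--     n = len(path)
--     for i, c in enumerate(path):
--         if c in '~\\$&!':
--             return True
--         if i + 1 < n and path[i + 1] == c and c in '/.%':
--             return True
--     return path.endswith('.php') or path.endswith('.py')
-- ===== Notes on version B (the rewrite author's own statement) =====
-- stated objective: alternative
-- what changed: A runs eleven separate substring searches over the path (one per entry of forbidden_characters, including the redundant '$$%', '&&', '!!' absorbed by '$', '&', '!'); B makes one left-to-right scan of the characters, flagging a forbidden single character or a doubled '/', '.' or '%', then checks the two extensions.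
import Mathlib
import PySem

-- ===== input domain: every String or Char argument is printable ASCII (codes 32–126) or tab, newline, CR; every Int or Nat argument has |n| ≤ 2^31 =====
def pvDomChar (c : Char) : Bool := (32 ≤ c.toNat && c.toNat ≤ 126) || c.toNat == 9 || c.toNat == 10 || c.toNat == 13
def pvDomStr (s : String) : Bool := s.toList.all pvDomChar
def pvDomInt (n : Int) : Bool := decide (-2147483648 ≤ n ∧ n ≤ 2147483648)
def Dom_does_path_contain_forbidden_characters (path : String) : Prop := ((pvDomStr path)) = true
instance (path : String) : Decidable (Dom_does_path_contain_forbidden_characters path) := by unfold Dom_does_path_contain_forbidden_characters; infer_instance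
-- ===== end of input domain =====

-- B replaces A's eleven substring searches by one left-to-right character scan
-- (forbidden single chars + doubled '/','.','%' + extension check): alternative decomposition.


-- ===== PORT A =====
-- note: '$$' '%' in the Python source is one concatenated literal "$$%"
def forbidden_characters : List String :=
  ["//", "..", "~", "\\", "$", "$$%", "&", "%%", "&&", "!", "!!"]

def forbidden_extensions : List String := [".php", ".py"]

-- first for-loop with early return, then second for-loop with early return
def does_path_contain_forbidden_characters (path : String) : Bool :=
  if forbidden_characters.any (fun char => PySem.Str.isIn char path) then true
  else if forbidden_extensions.any (fun ext => PySem.Str.endswith path ext) then true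
  else false

-- ===== PORT B =====
-- the scan loop of Source B: at index i check `c in '~\\$&!'`, then the doubled-char test
-- `i + 1 < n and path[i + 1] == c and c in '/.%'` at the current position
def pvPairHere (c : Char) : List Char → Bool
  | d :: _ => d == c && decide (c ∈ ['/', '.', '%'])
  | [] => false

def pvScanB : List Char → Bool
  | [] => false
  | c :: rest =>
    if c ∈ ['~', '\\', '$', '&', '!'] then true
    else if pvPairHere c rest then true
    else pvScanB rest

def does_path_contain_forbidden_characters_alt (path : String) : Bool :=
  if pvScanB path.toList then true
  else PySem.Str.endswith path ".php" || PySem.Str.endswith path ".py"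

-- ===== PRECONDITION & SPEC =====
def Spec_does_path_contain_forbidden_characters (path : String) (out : Bool) : Prop := out = does_path_contain_forbidden_characters_alt path
instance (path : String) (out : Bool) : Decidable (Spec_does_path_contain_forbidden_characters path out) := by unfold Spec_does_path_contain_forbidden_characters; infer_instance

-- ===== CLAIM (what is proved, stated in full; the proofs are below) =====
def Claim_equal_does_path_contain_forbidden_characters : Prop := ∀ (path : String), Dom_does_path_contain_forbidden_characters path → Spec_does_path_contain_forbidden_characters path (does_path_contain_forbidden_characters path)

-- ===== LEMMAS AND PROOFS =====

-- one-step unfolding of the scan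
theorem pvScanB_cons (c : Char) (rest : List Char) :
    pvScanB (c :: rest) =
      if c ∈ (['~', '\\', '$', '&', '!'] : List Char) then true
      else if pvPairHere c rest then true
      else pvScanB rest := rfl

-- a doubled character as an infix of a cons, unfolded one step
theorem pair_infix_cons_iff (x c : Char) (rest : List Char) :
    ([x, x] <:+: c :: rest) ↔ (c = x ∧ rest.head? = some x) ∨ [x, x] <:+: rest := by
  rw [List.infix_cons_iff, List.cons_prefix_cons]
  cases rest with
  | nil => simp
  | cons d t =>
    simp only [List.cons_prefix_cons, List.head?_cons, Option.some.injEq, List.nil_prefix,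
      and_true]
    constructor
    · rintro (⟨h1, h2⟩ | h)
      · exact Or.inl ⟨h1.symm, h2.symm⟩
      · exact Or.inr h
    · rintro (⟨h1, h2⟩ | h)
      · exact Or.inl ⟨h1.symm, h2.symm⟩
      · exact Or.inr h

-- B's scan finds exactly: a forbidden single character, or a doubled '/', '.' or '%'
theorem pvScanB_iff (cs : List Char) :
    pvScanB cs = true ↔
      (∃ c ∈ cs, c ∈ (['~', '\\', '$', '&', '!'] : List Char)) ∨
      ['/', '/'] <:+: cs ∨ ['.', '.'] <:+: cs ∨ ['%', '%'] <:+: cs := by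
  induction cs with
  | nil => simp [pvScanB]
  | cons c rest ih =>
    rw [pvScanB_cons]
    by_cases hbad : c ∈ (['~', '\\', '$', '&', '!'] : List Char)
    · simp only [if_pos hbad, true_iff]
      exact Or.inl ⟨c, List.mem_cons.mpr (Or.inl rfl), hbad⟩
    · rw [if_neg hbad]
      by_cases hb : pvPairHere c rest = true
      · simp only [if_pos hb, true_iff]
        cases rest with
        | nil => exact absurd hb (by simp [pvPairHere])
        | cons d t =>
          simp only [pvPairHere, Bool.and_eq_true, beq_iff_eq, decide_eq_true_eq,
            List.mem_cons, List.not_mem_nil, or_false] at hb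
          obtain ⟨hdc, hcs⟩ := hb
          have hpre : [c, c] <+: c :: d :: t := ⟨t, by simp [hdc]⟩
          rcases hcs with rfl | rfl | rfl
          · exact Or.inr (Or.inl hpre.isInfix)
          · exact Or.inr (Or.inr (Or.inl hpre.isInfix))
          · exact Or.inr (Or.inr (Or.inr hpre.isInfix))
      · rw [if_neg hb, ih]
        have hs1 : (∃ a ∈ c :: rest, a ∈ (['~', '\\', '$', '&', '!'] : List Char)) ↔
            (∃ a ∈ rest, a ∈ (['~', '\\', '$', '&', '!'] : List Char)) := by
          constructor
          · rintro ⟨a, ha, h2⟩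
            rcases List.mem_cons.mp ha with rfl | ha'
            · exact absurd h2 hbad
            · exact ⟨a, ha', h2⟩
          · rintro ⟨a, ha, h2⟩
            exact ⟨a, List.mem_cons_of_mem _ ha, h2⟩
        have hp : ∀ x : Char, x ∈ (['/', '.', '%'] : List Char) →
            (([x, x] <:+: c :: rest) ↔ ([x, x] <:+: rest)) := by
          intro x hx
          rw [pair_infix_cons_iff]
          constructor
          · rintro (⟨rfl, hh⟩ | h)
            · cases rest with
              | nil => exact absurd hh (by simp)
              | cons d t =>
                simp only [List.head?_cons, Option.some.injEq] at hh
                exact absurd (by simp [pvPairHere, hh, hx]) hb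
            · exact h
          · exact fun h => Or.inr h
        rw [hs1, hp '/' (by simp), hp '.' (by simp), hp '%' (by simp)]

-- ===== VERDICT (by name: the statement is the Claim_ definition above) =====

theorem does_path_contain_forbidden_characters_spec : Claim_equal_does_path_contain_forbidden_characters := by
  intro path _
  unfold Spec_does_path_contain_forbidden_characters
  unfold does_path_contain_forbidden_characters does_path_contain_forbidden_characters_alt
  unfold forbidden_characters forbidden_extensions
  rcases hs : pvScanB path.toList with _ | _
  · -- scan is false: no forbidden substring is present
    have h := (pvScanB_iff path.toList).not.mp (by simp [hs])
    push Not at h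
    obtain ⟨h1, h2, h3, h4⟩ := h
    have hany : (["//", "..", "~", "\\", "$", "$$%", "&", "%%", "&&", "!", "!!"].any
        (fun char => PySem.Str.isIn char path)) = false := by
      simp only [List.any_cons, List.any_nil, Bool.or_eq_false_iff]
      refine ⟨?_, ?_, ?_, ?_, ?_, ?_, ?_, ?_, ?_, ?_, ?_, by simp⟩ <;>
        simp only [PySem.Str.isIn_eq, PySem.Chars.isIn_eq_false_iff] <;>
        intro hin
      · exact h2 (by simpa using hin)
      · exact h3 (by simpa using hin)
      · exact h1 '~' (((List.singleton_infix_iff _ _).mp (by simpa using hin))) (by simp)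
      · exact h1 '\\' (((List.singleton_infix_iff _ _).mp (by simpa using hin))) (by simp)
      · exact h1 '$' (((List.singleton_infix_iff _ _).mp (by simpa using hin))) (by simp)
      · exact h1 '$' (hin.subset (by simp)) (by simp)
      · exact h1 '&' (((List.singleton_infix_iff _ _).mp (by simpa using hin))) (by simp)
      · exact h4 (by simpa using hin)
      · exact h1 '&' (hin.subset (by simp)) (by simp)
      · exact h1 '!' (((List.singleton_infix_iff _ _).mp (by simpa using hin))) (by simp)
      · exact h1 '!' (hin.subset (by simp)) (by simp)
    rw [if_neg (by rw [hany]; exact Bool.false_ne_true)]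
    simp only [Bool.false_eq_true, if_false, List.any_cons, List.any_nil, Bool.or_false]
    cases PySem.Str.endswith path ".php" || PySem.Str.endswith path ".py" <;> simp
  · -- scan is true: the corresponding forbidden substring makes A return true too
    have h := (pvScanB_iff path.toList).mp hs
    have hany : (["//", "..", "~", "\\", "$", "$$%", "&", "%%", "&&", "!", "!!"].any
        (fun char => PySem.Str.isIn char path)) = true := by
      simp only [List.any_eq_true]
      rcases h with ⟨c, hc, hset⟩ | h | h | h
      · simp only [List.mem_cons] at hset
        rcases hset with rfl | rfl | rfl | rfl | rfl | h0
        · exact ⟨"~", by simp, by simp [PySem.Chars.isIn_iff_infix, (List.singleton_infix_iff _ _).mpr hc]⟩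
        · exact ⟨"\\", by simp, by simp [PySem.Chars.isIn_iff_infix, (List.singleton_infix_iff _ _).mpr hc]⟩
        · exact ⟨"$", by simp, by simp [PySem.Chars.isIn_iff_infix, (List.singleton_infix_iff _ _).mpr hc]⟩
        · exact ⟨"&", by simp, by simp [PySem.Chars.isIn_iff_infix, (List.singleton_infix_iff _ _).mpr hc]⟩
        · exact ⟨"!", by simp, by simp [PySem.Chars.isIn_iff_infix, (List.singleton_infix_iff _ _).mpr hc]⟩
        · simp at h0
      · exact ⟨"//", by simp, by simp [PySem.Chars.isIn_iff_infix]; simpa using h⟩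
      · exact ⟨"..", by simp, by simp [PySem.Chars.isIn_iff_infix]; simpa using h⟩
      · exact ⟨"%%", by simp, by simp [PySem.Chars.isIn_iff_infix]; simpa using h⟩
    rw [if_pos hany]
    simp
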